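-- pv_equiv track=rewrite | github.com/LucasLHenry/Clock_Radio | main.py | offset_with_bounds
-- ===== SOURCE A (Python) =====
-- def offset_with_bounds(value, offset, lower_bound, upper_bound, wrap = True):
--     newvalue = value + offset
--     if wrap:
--         while newvalue < lower_bound:
--             newvalue += upper_bound - lower_bound
--         while newvalue >= upper_bound:
--             newvalue -= upper_bound - lower_bound
--     else:
--         if newvalue < lower_bound:
--             newvalue = lower_bound
--         elif newvalue > upper_bound - 1:
--             newvalue = upper_bound - 1
--     return newvalue
-- ===== SOURCE B (Python) =====
-- def offset_with_bounds(value, offset, lower_bound, upper_bound, wrap = True):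
--     newvalue = value + offset
--     if wrap:
--         return lower_bound + (newvalue - lower_bound) % (upper_bound - lower_bound)
--     return min(max(newvalue, lower_bound), upper_bound - 1)
-- ===== Notes on version B (the rewrite author's own statement) =====
-- stated objective: simpler
-- what changed: Replaces A's wrap loops with a single modular-arithmetic expression and the clamp branch chain with min/max.
-- outside the precondition, e.g. on offset_with_bounds(4, 0, 5, 3, False): A returns 5, B returns 2; on offset_with_bounds(1, 0, 0, 0, True): A does not finish within the time limit, B raises ZeroDivisionError
import Mathlib
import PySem

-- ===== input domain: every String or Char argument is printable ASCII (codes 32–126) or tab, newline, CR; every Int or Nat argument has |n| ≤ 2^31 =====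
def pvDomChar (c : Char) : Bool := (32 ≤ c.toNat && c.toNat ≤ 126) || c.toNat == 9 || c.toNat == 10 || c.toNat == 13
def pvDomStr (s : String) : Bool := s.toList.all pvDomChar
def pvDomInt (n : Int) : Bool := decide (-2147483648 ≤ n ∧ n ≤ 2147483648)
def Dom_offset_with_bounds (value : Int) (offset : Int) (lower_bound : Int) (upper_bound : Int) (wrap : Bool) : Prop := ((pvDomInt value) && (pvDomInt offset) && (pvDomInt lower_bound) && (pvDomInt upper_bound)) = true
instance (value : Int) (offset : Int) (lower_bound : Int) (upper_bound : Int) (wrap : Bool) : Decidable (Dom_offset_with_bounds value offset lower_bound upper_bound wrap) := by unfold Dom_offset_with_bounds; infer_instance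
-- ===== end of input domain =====

-- B replaces A's wrap loops with one modular-arithmetic expression and the clamp branch chain with min/max (simpler).


-- ===== PORT A =====
-- 'while newvalue < lower_bound: newvalue += d'; the 0 < d guard only makes the loop total (Python diverges when d ≤ 0, excluded by Pre_)
def pvWrapUp (nv lower d : Int) : Int :=
  if h : nv < lower ∧ 0 < d then pvWrapUp (nv + d) lower d else nv
  termination_by (lower - nv).toNat
  decreasing_by omega

-- 'while newvalue >= upper_bound: newvalue -= d'; same totality guard
def pvWrapDown (nv upper d : Int) : Int :=
  if h : upper ≤ nv ∧ 0 < d then pvWrapDown (nv - d) upper d else nv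
  termination_by (nv + 1 - upper).toNat
  decreasing_by omega

def offset_with_bounds (value : Int) (offset : Int) (lower_bound : Int) (upper_bound : Int) (wrap : Bool) : Int :=
  let newvalue := value + offset
  if wrap then
    pvWrapDown (pvWrapUp newvalue lower_bound (upper_bound - lower_bound)) upper_bound (upper_bound - lower_bound)
  else
    if newvalue < lower_bound then lower_bound
    else if newvalue > upper_bound - 1 then upper_bound - 1
    else newvalue

-- ===== PORT B =====
def offset_with_bounds_alt (value : Int) (offset : Int) (lower_bound : Int) (upper_bound : Int) (wrap : Bool) : Int :=
  let newvalue := value + offset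
  if wrap then
    lower_bound + PySem.Int.mod (newvalue - lower_bound) (upper_bound - lower_bound)
  else
    min (max newvalue lower_bound) (upper_bound - 1)

-- ===== PRECONDITION & SPEC =====
-- Pre_ requires lower_bound < upper_bound: with wrap A diverges (its loops add/subtract a non-positive step)
-- and B raises ZeroDivisionError or returns; without wrap the clamp bounds are contradictory, so the value A
-- returns there (lower_bound vs upper_bound-1 by branch order) is an accidental artefact of a degenerate corner.
def Pre_offset_with_bounds (value : Int) (offset : Int) (lower_bound : Int) (upper_bound : Int) (wrap : Bool) : Prop :=
  lower_bound < upper_bound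
instance (value : Int) (offset : Int) (lower_bound : Int) (upper_bound : Int) (wrap : Bool) : Decidable (Pre_offset_with_bounds value offset lower_bound upper_bound wrap) := by unfold Pre_offset_with_bounds; infer_instance
def pvWitness_offset_with_bounds : Int × Int × Int × Int × Bool := (3, 10, 0, 7, true)
def Spec_offset_with_bounds (value : Int) (offset : Int) (lower_bound : Int) (upper_bound : Int) (wrap : Bool) (out : Int) : Prop := out = offset_with_bounds_alt value offset lower_bound upper_bound wrap
instance (value : Int) (offset : Int) (lower_bound : Int) (upper_bound : Int) (wrap : Bool) (out : Int) : Decidable (Spec_offset_with_bounds value offset lower_bound upper_bound wrap out) := by unfold Spec_offset_with_bounds; infer_instance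

-- ===== CLAIM (what is proved, stated in full; the proofs are below) =====
def Claim_equal_offset_with_bounds : Prop := ∀ (value : Int) (offset : Int) (lower_bound : Int) (upper_bound : Int) (wrap : Bool), Dom_offset_with_bounds value offset lower_bound upper_bound wrap → Pre_offset_with_bounds value offset lower_bound upper_bound wrap → Spec_offset_with_bounds value offset lower_bound upper_bound wrap (offset_with_bounds value offset lower_bound upper_bound wrap)

-- ===== LEMMAS AND PROOFS =====
theorem pvWrapUp_ge (nv lower d : Int) (hd : 0 < d) : lower ≤ pvWrapUp nv lower d ∨ (¬ nv < lower ∧ pvWrapUp nv lower d = nv) := by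
  fun_induction pvWrapUp nv lower d with
  | case1 nv h ih => exact Or.inl (ih.elim id (fun ⟨h1, h2⟩ => by omega))
  | case2 nv h =>
    by_cases hlt : nv < lower
    · exact absurd ⟨hlt, hd⟩ h
    · exact Or.inr ⟨hlt, rfl⟩

theorem pvWrapUp_mod (nv lower d : Int) : pvWrapUp nv lower d % d = nv % d := by
  fun_induction pvWrapUp nv lower d with
  | case1 nv h ih => rw [ih]; simpa using Int.add_mul_emod_self_left (a := nv) (b := d) (c := 1)
  | case2 nv h => rfl

theorem pvWrapDown_lt (nv upper d : Int) (hd : 0 < d) : pvWrapDown nv upper d < upper := by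
  fun_induction pvWrapDown nv upper d with
  | case1 nv h ih => exact ih
  | case2 nv h => omega

theorem pvWrapDown_mod (nv upper d : Int) : pvWrapDown nv upper d % d = nv % d := by
  fun_induction pvWrapDown nv upper d with
  | case1 nv h ih => rw [ih]; simpa using Int.add_mul_emod_self_left (a := nv) (b := d) (c := -1)
  | case2 nv h => rfl

theorem pvWrapDown_ge (nv upper d : Int) (h : upper - d ≤ nv) : upper - d ≤ pvWrapDown nv upper d := by
  fun_induction pvWrapDown nv upper d with
  | case1 nv hc ih => exact ih (by omega)
  | case2 nv hc => exact h

-- the wrapped value lies in [lower, upper) and is congruent to nv mod d; so does lower + (nv-lower) % d → equal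
theorem wrap_eq (nv lower upper : Int) (h : lower < upper) :
    pvWrapDown (pvWrapUp nv lower (upper - lower)) upper (upper - lower)
      = lower + (nv - lower) % (upper - lower) := by
  set d := upper - lower with hd
  have hdpos : 0 < d := by omega
  have hup_ge : lower ≤ pvWrapUp nv lower d := by
    rcases pvWrapUp_ge nv lower d hdpos with h1 | ⟨h1, _⟩ <;> omega
  have hdown_ge : upper - d ≤ pvWrapDown (pvWrapUp nv lower d) upper d :=
    pvWrapDown_ge _ _ _ (by omega)
  have hdown_lt : pvWrapDown (pvWrapUp nv lower d) upper d < upper :=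
    pvWrapDown_lt _ _ _ hdpos
  have hmod : pvWrapDown (pvWrapUp nv lower d) upper d % d = nv % d := by
    rw [pvWrapDown_mod, pvWrapUp_mod]
  -- both sides are in [lower, lower+d) and congruent to nv mod d
  set r := pvWrapDown (pvWrapUp nv lower d) upper d with hr
  have h1 : (r - lower) % d = (nv - lower) % d := by
    conv_lhs => rw [Int.sub_emod, hmod, ← Int.sub_emod]
  have h2 : (r - lower) % d = r - lower := Int.emod_eq_of_lt (by omega) (by omega)
  omega

theorem offset_with_bounds_spec : Claim_equal_offset_with_bounds := by
  intro value offset lower upper wrap _ hpre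
  unfold Spec_offset_with_bounds offset_with_bounds offset_with_bounds_alt
  cases wrap with
  | true =>
    simp only [if_pos]
    rw [wrap_eq _ _ _ hpre, PySem.Int.mod_eq_emod_of_pos (sub_pos.mpr hpre)]
  | false =>
    simp only [Bool.false_eq_true, if_false]
    have : lower < upper := hpre
    split_ifs <;> omega
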